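-- pv_equiv track=rewrite | github.com/amauriciorr/AubreyBot | utils.py | create_text_and_target
-- ===== SOURCE A (Python) =====
-- def create_text_and_target(song):
--
--     text_and_target_dict = {}
--     song = song.split('\n')
--     # 0-index refers to song-part designation that was replaced
--     # by empty string, i.e. [INTRO]
--     base_lyric = song[1]
--     for lyric in song[2:]:
--         if lyric:
--             text_and_target_dict[base_lyric] = lyric
--             base_lyric += ('\n ' + lyric)
--
--     '''
--     TO DO
--     LOOK AT PERSONACHAT JSON FILE
--     MAKE SAME KEY-VALUE PAIR STRUCTURE HERE
--     '''
--
--     return text_and_target_dict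
-- ===== SOURCE B (Python) =====
-- def create_text_and_target(song):
--     lines = song.split('\n')
--     # 0-index is the song-part designation; IndexError preserved on short input
--     base = lines[1]
--     nonempty = [lyric for lyric in lines[2:] if lyric]
--     return {'\n '.join([base] + nonempty[:i]): lyric
--             for i, lyric in enumerate(nonempty)}
-- ===== Notes on version B (the rewrite author's own statement) =====
-- stated objective: alternative
-- what changed: Replaces the stateful loop that threads a mutated accumulator string and dict through each iteration by a filter of the non-empty lyrics followed by a dict comprehension whose each key is recomputed independently as a join of a prefix slice.
import Mathlib
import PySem

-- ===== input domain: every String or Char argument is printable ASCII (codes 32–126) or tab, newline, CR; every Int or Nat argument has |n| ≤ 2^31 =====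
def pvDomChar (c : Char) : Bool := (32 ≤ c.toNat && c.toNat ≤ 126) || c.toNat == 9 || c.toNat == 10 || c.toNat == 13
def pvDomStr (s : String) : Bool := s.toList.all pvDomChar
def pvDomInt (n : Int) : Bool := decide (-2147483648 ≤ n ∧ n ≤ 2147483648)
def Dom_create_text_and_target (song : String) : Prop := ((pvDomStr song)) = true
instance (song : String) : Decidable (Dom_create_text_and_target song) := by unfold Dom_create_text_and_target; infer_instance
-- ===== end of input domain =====

-- B replaces A's stateful accumulator loop by filter + enumerate with each key recomputed as a
-- join of a prefix slice (alternative decomposition, same cost).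


-- ===== PORT A =====
def create_text_and_target (song : String) : List (String × String) :=
  let lines := (PySem.Str.split? song "\n").getD []   -- sep "\n" ≠ "", so split? is some
  match PySem.List.pyGet? lines 1 with
  | none => []   -- IndexError (song[1]); excluded by Pre_
  | some base_lyric =>
    ((PySem.List.slice lines (some 2) none).foldl
      (fun (st : PySem.Dict String String × String) lyric =>
        if lyric ≠ "" then (st.1.insert st.2 lyric, st.2 ++ ("\n " ++ lyric)) else st)
      (PySem.Dict.empty, base_lyric)).1.items

-- ===== PORT B =====
def create_text_and_target_alt (song : String) : List (String × String) :=
  let lines := (PySem.Str.split? song "\n").getD []   -- sep "\n" ≠ "", so split? is some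
  match PySem.List.pyGet? lines 1 with
  | none => []   -- IndexError (lines[1]); excluded by Pre_
  | some base =>
    let nonempty := (PySem.List.slice lines (some 2) none).filter (fun l => l ≠ "")
    ((PySem.List.enumerate nonempty 0).foldl
      (fun (d : PySem.Dict String String) p =>
        d.insert (PySem.Str.join "\n " (base :: PySem.List.slice nonempty none (some p.1))) p.2)
      PySem.Dict.empty).items

-- ===== PRECONDITION & SPEC =====
-- Pre_ excludes exactly the inputs on which A raises IndexError at song[1]: songs whose
-- line-split yields fewer than two pieces (single-line songs).
def Pre_create_text_and_target (song : String) : Prop :=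
  2 ≤ ((PySem.Str.split? song "\n").getD []).length
instance (song : String) : Decidable (Pre_create_text_and_target song) := by
  unfold Pre_create_text_and_target; infer_instance

def pvWitness_create_text_and_target : String := "[INTRO]\nhello\nworld\n\nagain"

def Spec_create_text_and_target (song : String) (out : List (String × String)) : Prop :=
  out = create_text_and_target_alt song
instance (song : String) (out : List (String × String)) : Decidable (Spec_create_text_and_target song out) := by
  unfold Spec_create_text_and_target; infer_instance

-- ===== CLAIM (what is proved, stated in full; the proofs are below) =====
def Claim_equal_create_text_and_target : Prop :=
  ∀ (song : String), Dom_create_text_and_target song → Pre_create_text_and_target song →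
    Spec_create_text_and_target song (create_text_and_target song)

-- ===== LEMMAS AND PROOFS =====

-- '\n '.join(x :: xs) ++ '\n ' ++ y appends y as one more joined piece (Chars level).
theorem pv_chars_join_snoc (sep x y : List Char) (xs : List (List Char)) :
    PySem.Chars.join sep (x :: (xs ++ [y])) = PySem.Chars.join sep (x :: xs) ++ sep ++ y := by
  induction xs generalizing x with
  | nil => simp [PySem.Chars.join_singleton, PySem.Chars.join_cons_cons]
  | cons h t ih =>
      rw [List.cons_append, PySem.Chars.join_cons_cons, PySem.Chars.join_cons_cons, ih h]
      simp [List.append_assoc]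

theorem pv_join_snoc (x y : String) (xs : List String) :
    PySem.Str.join "\n " (x :: xs) ++ ("\n " ++ y) = PySem.Str.join "\n " (x :: (xs ++ [y])) := by
  apply String.ext
  simp [PySem.Str.toList_join, pv_chars_join_snoc, List.append_assoc]

theorem pv_join_singleton (x : String) : PySem.Str.join "\n " [x] = x := by
  apply String.ext
  simp [PySem.Str.toList_join, PySem.Chars.join_singleton]

-- Loop invariant: A's accumulator string is the join of base with the lyrics already consumed.
theorem pv_main (base : String) (nonempty : List String) :
    ∀ (ls done : List String) (d : PySem.Dict String String), done ++ ls = nonempty →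
      (ls.foldl
        (fun (st : PySem.Dict String String × String) lyric =>
          (st.1.insert st.2 lyric, st.2 ++ ("\n " ++ lyric)))
        (d, PySem.Str.join "\n " (base :: done))).1
      = (PySem.List.enumerate ls (done.length : Int)).foldl
          (fun d p =>
            d.insert (PySem.Str.join "\n " (base :: PySem.List.slice nonempty none (some p.1))) p.2)
          d := by
  intro ls
  induction ls with
  | nil => intro done d h; simp [PySem.List.enumerate]
  | cons l ls ih =>
      intro done d h
      rw [List.foldl_cons, PySem.List.enumerate_cons, List.foldl_cons]
      have hslice : PySem.List.slice nonempty none (some ((done.length : Nat) : Int))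
          = done := by
        rw [PySem.List.slice_to nonempty (by positivity)]
        simp [← h]
      rw [hslice, pv_join_snoc]
      have hlen : ((done.length : Int) + 1) = (((done ++ [l]).length : Nat) : Int) := by
        simp
      rw [hlen]
      exact ih (done ++ [l]) _ (by simpa using h)

-- ===== VERDICT (by name: the statement is the Claim_ definition above) =====
theorem create_text_and_target_spec : Claim_equal_create_text_and_target := by
  intro song _ hpre
  have hlen : 1 < ((PySem.Str.split? song "\n").getD []).length := hpre
  have h1 := PySem.List.pyGet?_ofNat ((PySem.Str.split? song "\n").getD []) 1 hlen
  unfold Spec_create_text_and_target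
  simp only [create_text_and_target, create_text_and_target_alt, Nat.cast_one] at h1 ⊢
  rw [h1]
  dsimp only
  rw [PySem.List.foldl_ite_eq_foldl_filter (fun l => l ≠ "")
    (fun (st : PySem.Dict String String × String) lyric =>
      (st.1.insert st.2 lyric, st.2 ++ ("\n " ++ lyric)))]
  have key := pv_main (((PySem.Str.split? song "\n").getD [])[1]'hlen)
    ((PySem.List.slice ((PySem.Str.split? song "\n").getD []) (some 2) none).filter (fun l => l ≠ ""))
    ((PySem.List.slice ((PySem.Str.split? song "\n").getD []) (some 2) none).filter (fun l => l ≠ ""))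
    [] PySem.Dict.empty rfl
  simp only [List.length_nil, Nat.cast_zero] at key
  rw [pv_join_singleton] at key
  rw [key]
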